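-- pv_equiv track=rewrite | github.com/yannickloth/W33-Theory | bundles/v10_clifford_cycle/clifford_v10/compute_clifford_reduction.py | cliff_mult
-- ===== SOURCE A (Python) =====
-- def cliff_mult(a_mask, a_sign, b_mask, b_sign):
--     sign = a_sign * b_sign
--     swaps = 0
--     for j in range(3):
--         if (b_mask >> j) & 1:
--             swaps += bin(a_mask & ((1 << j) - 1)).count("1")
--     if swaps % 2 == 1:
--         sign *= -1
--     return a_mask ^ b_mask, sign
-- ===== SOURCE B (Python) =====
-- def cliff_mult(a_mask, a_sign, b_mask, b_sign):
--     # Sign from the number of transpositions: one swap for every pair of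
--     # generator indices i < j with e_i in a and e_j in b (positions 0..2).
--     swaps = 0
--     for i in range(3):
--         for j in range(3):
--             if i < j and (a_mask >> i) & 1 and (b_mask >> j) & 1:
--                 swaps += 1
--     sign = a_sign * b_sign
--     if swaps % 2 == 1:
--         sign = -sign
--     return a_mask ^ b_mask, sign
-- ===== Notes on version B (the rewrite author's own statement) =====
-- stated objective: alternative
-- what changed: B computes the sign by a direct pairwise scan over bit positions i<j<3 counting one swap per (a-bit i, b-bit j) pair, instead of A's per-b-bit prefix popcount via bin(...).count('1') on masked values.
import Mathlib
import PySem

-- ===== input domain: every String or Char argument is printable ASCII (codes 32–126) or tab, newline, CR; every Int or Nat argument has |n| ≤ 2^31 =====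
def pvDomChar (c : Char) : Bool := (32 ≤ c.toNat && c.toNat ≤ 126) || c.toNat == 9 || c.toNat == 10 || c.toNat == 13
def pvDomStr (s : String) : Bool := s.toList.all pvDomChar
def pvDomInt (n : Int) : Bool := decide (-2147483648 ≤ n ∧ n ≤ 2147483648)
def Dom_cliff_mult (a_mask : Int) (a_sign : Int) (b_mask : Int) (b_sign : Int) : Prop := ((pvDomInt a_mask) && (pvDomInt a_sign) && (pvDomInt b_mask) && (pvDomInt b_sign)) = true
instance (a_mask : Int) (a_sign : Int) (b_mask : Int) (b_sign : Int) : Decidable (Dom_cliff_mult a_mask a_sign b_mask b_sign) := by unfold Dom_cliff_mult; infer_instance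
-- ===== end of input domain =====

-- B replaces A's per-b-bit prefix popcount (bin(a&((1<<j)-1)).count("1")) with a direct
-- pairwise swap count over generator positions i < j < 3 (objective: alternative decomposition).

-- ===== PORT A =====
-- bin(x).count("1") is ported as PySem.Int.bitCount x (exact: bin's "0b"/"-0b" prefix
-- contains no '1' digit character, so the count is the bit count of |x|).
def cliff_mult (a_mask : Int) (a_sign : Int) (b_mask : Int) (b_sign : Int) : Int × Int :=
  let sign := a_sign * b_sign
  let swaps : Int := (PySem.List.pyRange 0 3 1).foldl (fun swaps j =>
    if PySem.Int.band (b_mask >>> j.toNat) 1 ≠ 0 then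
      swaps + (PySem.Int.bitCount (PySem.Int.band a_mask ((1 <<< j.toNat) - 1)) : Int)
    else swaps) 0
  let sign := if PySem.Int.mod swaps 2 = 1 then sign * (-1) else sign
  (PySem.Int.bxor a_mask b_mask, sign)

-- ===== PORT B =====
def cliff_mult_alt (a_mask : Int) (a_sign : Int) (b_mask : Int) (b_sign : Int) : Int × Int :=
  let swaps : Int := (PySem.List.pyRange 0 3 1).foldl (fun s i =>
    (PySem.List.pyRange 0 3 1).foldl (fun s j =>
      if i < j ∧ PySem.Int.band (a_mask >>> i.toNat) 1 ≠ 0 ∧ PySem.Int.band (b_mask >>> j.toNat) 1 ≠ 0 then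
        s + 1
      else s) s) 0
  let sign := a_sign * b_sign
  let sign := if PySem.Int.mod swaps 2 = 1 then -sign else sign
  (PySem.Int.bxor a_mask b_mask, sign)

-- ===== PRECONDITION & SPEC =====
def Spec_cliff_mult (a_mask : Int) (a_sign : Int) (b_mask : Int) (b_sign : Int) (out : Int × Int) : Prop := out = cliff_mult_alt a_mask a_sign b_mask b_sign
instance (a_mask : Int) (a_sign : Int) (b_mask : Int) (b_sign : Int) (out : Int × Int) : Decidable (Spec_cliff_mult a_mask a_sign b_mask b_sign out) := by unfold Spec_cliff_mult; infer_instance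

-- ===== CLAIM (what is proved, stated in full; the proofs are below) =====
def Claim_equal_cliff_mult : Prop := ∀ (a_mask : Int) (a_sign : Int) (b_mask : Int) (b_sign : Int), Dom_cliff_mult a_mask a_sign b_mask b_sign → Spec_cliff_mult a_mask a_sign b_mask b_sign (cliff_mult a_mask a_sign b_mask b_sign)

-- ===== LEMMAS AND PROOFS =====

theorem nat_and3 (n : Nat) : n &&& 3 = n % 4 := by
  have := Nat.and_two_pow_sub_one_eq_mod n 2
  norm_num at this; omega

theorem band3 (a : Int) : PySem.Int.band a 3 = a % 4 := by
  unfold PySem.Int.band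
  have h3 : Int.toNat 3 = 3 := rfl
  simp only [h3]
  split_ifs with h h2 h2
  · rw [nat_and3]; omega
  · omega
  · rw [Nat.and_comm, nat_and3]; omega
  · omega

theorem bitcount_small (n : Int) (h0 : 0 ≤ n) (h4 : n < 4) :
    (PySem.Int.bitCount n : Int) = n % 2 + (n / 2) % 2 := by
  interval_cases n <;> decide

-- ===== VERDICT (by name: the statement is the Claim_ definition above) =====
theorem cliff_mult_spec : Claim_equal_cliff_mult := by
  intro a_mask a_sign b_mask b_sign _
  unfold Spec_cliff_mult
  have hr : PySem.List.pyRange 0 3 1 = [0,1,2] := by decide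
  have htn : (2:Int).toNat = 2 := rfl
  unfold cliff_mult cliff_mult_alt
  rw [hr]
  simp only [List.foldl, htn, Int.toNat_zero, Int.toNat_one, Int.shiftRight_natCast_right]
  norm_num [Int.shiftRight_eq_div_pow, band3, PySem.Int.band_one, PySem.Int.band_zero,
    PySem.Int.mod_eq_emod_of_pos]
  rw [show ((1:Int) <<< (1:Nat)) - 1 = 1 from by decide,
      show ((1:Int) <<< (2:Nat)) - 1 = 3 from by decide,
      PySem.Int.band_one, PySem.Int.mod_eq_emod_of_pos (show (0:Int) < 2 by norm_num), band3]
  rw [bitcount_small (a_mask % 2) (by omega) (by omega),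
      bitcount_small (a_mask % 4) (by omega) (by omega)]
  have h1 : a_mask % 2 % 2 = a_mask % 2 := by omega
  have h2 : a_mask % 2 / 2 = 0 := by omega
  have h3 : a_mask % 4 % 2 = a_mask % 2 := by omega
  have h4 : a_mask % 4 / 2 % 2 = a_mask / 2 % 2 := by omega
  rw [h1, h2, h3, h4]
  have ha0 : a_mask % 2 = 0 ∨ a_mask % 2 = 1 := by omega
  have ha1 : a_mask / 2 % 2 = 0 ∨ a_mask / 2 % 2 = 1 := by omega
  have hb1 : b_mask / 2 % 2 = 0 ∨ b_mask / 2 % 2 = 1 := by omega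
  have hb2 : b_mask / 4 % 2 = 0 ∨ b_mask / 4 % 2 = 1 := by omega
  rcases ha0 with h|h <;> rcases ha1 with h'|h' <;> rcases hb1 with h''|h'' <;>
    rcases hb2 with h'''|h''' <;> simp [h, h', h'', h''']
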